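-- pv_equiv track=rewrite | github.com/buckbaskin/pyexperiments | so_help_37336110.py | reorder_namedict
-- ===== SOURCE A (Python) =====
-- from collections import defaultdict
--
-- def reorder_namedict(namedict):
--     new_list_representation = defaultdict(dict)
--     for year in namedict:
--         for user_tuple in namedict[year]:
--             name, gender, num1, num2 = user_tuple
--             new_list_representation[str((name, gender,))][year] = [int(num1), int(num2)]
--
--     new_list = []
--
--     for key in sorted(new_list_representation):
--         new_list.append([{key: new_list_representation[key]}])
--
--     return new_list
-- ===== SOURCE B (Python) =====
-- def reorder_namedict(namedict):
--     # Sort-then-group: flatten to (key, year, value) rows, stable-sort by the key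
--     # string, then one sweep over adjacent runs of equal keys builds the output.
--     rows = [(str((name, gender,)), year, [int(num1), int(num2)])
--             for year, tuples in namedict.items()
--             for name, gender, num1, num2 in tuples]
--     rows.sort(key=lambda r: r[0])
--     out = []
--     i = 0
--     n = len(rows)
--     while i < n:
--         key = rows[i][0]
--         inner = {}
--         while i < n and rows[i][0] == key:
--             inner[rows[i][1]] = rows[i][2]
--             i += 1
--         out.append([{key: inner}])
--     return out
-- ===== Notes on version B (the rewrite author's own statement) =====
-- stated objective: alternative
-- what changed: B replaces A's group-then-sort (defaultdict of inner dicts, then sorted keys) with sort-then-group: flatten to (key, year, value) rows, stable-sort the rows by the key string, then a single sweep over adjacent runs of equal keys emits each group; no grouping dict is built.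
import Mathlib
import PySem

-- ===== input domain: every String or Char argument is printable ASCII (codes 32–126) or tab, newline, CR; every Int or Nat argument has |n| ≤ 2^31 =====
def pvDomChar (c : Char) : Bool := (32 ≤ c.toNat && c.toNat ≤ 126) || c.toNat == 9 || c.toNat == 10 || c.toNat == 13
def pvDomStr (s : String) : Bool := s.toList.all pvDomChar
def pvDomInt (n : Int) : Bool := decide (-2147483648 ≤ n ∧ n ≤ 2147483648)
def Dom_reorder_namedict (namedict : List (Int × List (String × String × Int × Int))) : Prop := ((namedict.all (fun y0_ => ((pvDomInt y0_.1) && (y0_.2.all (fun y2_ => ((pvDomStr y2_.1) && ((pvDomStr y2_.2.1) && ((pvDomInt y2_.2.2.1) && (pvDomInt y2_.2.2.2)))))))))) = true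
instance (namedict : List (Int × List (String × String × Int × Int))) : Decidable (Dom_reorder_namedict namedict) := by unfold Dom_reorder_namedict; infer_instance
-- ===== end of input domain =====

-- B sorts the flattened (key, year, value) rows stably by key and emits groups in one sweep
-- over adjacent runs, instead of A's defaultdict grouping followed by sorting its keys (objective: alternative).


-- Shared input/encoding helpers (both Pythons call str((name, gender,)); the assoc-list argument
-- is decoded to a Python dict — duplicate keys overwrite in place — before either body runs).

-- Python repr's escape of one character (exact on the Dom alphabet: printable ASCII, tab, LF, CR)
def pyEscChar (q : Char) (c : Char) : List Char :=
  if c = '\\' then ['\\', '\\']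
  else if c = q then ['\\', q]
  else if c = Char.ofNat 9 then ['\\', 't']
  else if c = Char.ofNat 10 then ['\\', 'n']
  else if c = Char.ofNat 13 then ['\\', 'r']
  else [c]

-- repr(s) as a character list: Python quotes with ' unless s contains ' and no "
def pyReprChars (s : String) : List Char :=
  let cs := s.toList
  let q : Char := if cs.contains '\'' && !(cs.contains '"') then '"' else '\''
  q :: (cs.flatMap (pyEscChar q) ++ [q])

-- str((name, gender,)) = "(" + repr(name) + ", " + repr(gender) + ")"
def pyStrPair (name gender : String) : String :=
  String.ofList ('(' :: (pyReprChars name ++ (',' :: ' ' :: pyReprChars gender) ++ [')']))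

-- ===== PORT A =====
def reorder_namedict (namedict : List (Int × List (String × String × Int × Int))) : List (List (List (String × List (Int × List Int)))) :=
  let d := PySem.Dict.ofList namedict
  let rep : PySem.Dict String (PySem.Dict Int (List Int)) :=
    d.items.foldl (fun rep p =>
      p.2.foldl (fun rep t =>
        rep.modify (pyStrPair t.1 t.2.1) PySem.Dict.empty
          (fun inner => inner.insert p.1 [t.2.2.1, t.2.2.2])) rep)
      PySem.Dict.empty
  (PySem.List.sorted rep.keys (fun k => k) false).foldl
    (fun out k => out ++ [[[(k, (rep.getD k PySem.Dict.empty).items)]]]) []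

-- ===== PORT B =====
-- the sweep of Source B's outer while loop: each step consumes one maximal run of equal keys
def pvSweep : List (String × Int × List Int) → List (List (List (String × List (Int × List Int))))
  | [] => []
  | r :: rest =>
    [[(r.1, (PySem.Dict.ofList ((r :: rest.takeWhile (fun s => s.1 == r.1)).map (fun s => (s.2.1, s.2.2)))).items)]]
      :: pvSweep (rest.dropWhile (fun s => s.1 == r.1))
termination_by l => l.length
decreasing_by simpa using Nat.lt_succ_of_le (List.dropWhile_sublist _).length_le

def reorder_namedict_alt (namedict : List (Int × List (String × String × Int × Int))) : List (List (List (String × List (Int × List Int)))) :=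
  let d := PySem.Dict.ofList namedict
  let rows : List (String × Int × List Int) :=
    d.items.flatMap (fun p => p.2.map (fun t => (pyStrPair t.1 t.2.1, p.1, [t.2.2.1, t.2.2.2])))
  pvSweep (PySem.List.sorted rows (fun r => r.1) false)

-- ===== PRECONDITION & SPEC =====
def Spec_reorder_namedict (namedict : List (Int × List (String × String × Int × Int))) (out : List (List (List (String × List (Int × List Int))))) : Prop := out = reorder_namedict_alt namedict
instance (namedict : List (Int × List (String × String × Int × Int))) (out : List (List (List (String × List (Int × List Int))))) : Decidable (Spec_reorder_namedict namedict out) := by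
  unfold Spec_reorder_namedict
  exact @instDecidableEqList _ (@instDecidableEqList _ (@instDecidableEqList _ inferInstance)) _ _

-- ===== CLAIM (what is proved, stated in full; the proofs are below) =====
def Claim_equal_reorder_namedict : Prop := ∀ (namedict : List (Int × List (String × String × Int × Int))), Dom_reorder_namedict namedict → Spec_reorder_namedict namedict (reorder_namedict namedict)

-- ===== LEMMAS AND PROOFS =====

-- A's group-by step on one row
def pvStep (rep : PySem.Dict String (PySem.Dict Int (List Int))) (r : String × Int × List Int) :
    PySem.Dict String (PySem.Dict Int (List Int)) :=
  rep.modify r.1 PySem.Dict.empty (fun inner => inner.insert r.2.1 r.2.2)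

-- A's nested loops are one fold over the flattened rows
lemma pv_flatten (l : List (Int × List (String × String × Int × Int)))
    (g : PySem.Dict String (PySem.Dict Int (List Int))) :
    l.foldl (fun rep p =>
        p.2.foldl (fun rep t =>
          rep.modify (pyStrPair t.1 t.2.1) PySem.Dict.empty
            (fun inner => inner.insert p.1 [t.2.2.1, t.2.2.2])) rep) g
      = (l.flatMap (fun p => p.2.map (fun t => (pyStrPair t.1 t.2.1, p.1, [t.2.2.1, t.2.2.2])))).foldl pvStep g := by
  induction l generalizing g with
  | nil => rfl
  | cons p rest ih =>
      simp only [List.foldl_cons, List.flatMap_cons, List.foldl_append, ih, List.foldl_map, pvStep]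

-- the keys of A's grouping dict are the distinct row keys in first-occurrence order
lemma pv_keys (rows : List (String × Int × List Int)) :
    (rows.foldl pvStep PySem.Dict.empty).keys = PySem.Set.ofList (rows.map (·.1)) := by
  have h := PySem.Dict.keys_foldl_modify_key rows (key := (·.1)) (d0 := PySem.Dict.empty)
      (f := fun rep r => fun inner => inner.insert r.2.1 r.2.2) (d := PySem.Dict.empty)
  simpa [pvStep, PySem.Set.ofList_eq_foldl, PySem.Set.update] using h

-- each entry of A's grouping dict is the insert-fold over the rows with that key
lemma pv_group (rows : List (String × Int × List Int))
    (g : PySem.Dict String (PySem.Dict Int (List Int))) (k : String) :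
    (rows.foldl pvStep g).getD k PySem.Dict.empty
      = (rows.filter (fun r => r.1 == k)).foldl
          (fun inner r => inner.insert r.2.1 r.2.2) (g.getD k PySem.Dict.empty) := by
  induction rows generalizing g with
  | nil => rfl
  | cons r rest ih =>
      by_cases h : r.1 = k
      · subst h
        simp [pvStep, ih, PySem.Dict.getD_modify_self]
      · simp [pvStep, ih,
          PySem.Dict.getD_modify_of_ne _ _ _ (Ne.symm h),
          (by simpa using h : (r.1 == k) = false)]

-- STABILITY of Python's sort: inserting x into a key-ordered list puts it after the equal keys,
-- so filtering one key commutes with the insertion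
lemma pv_filter_insertBy {α : Type} (key : α → String) (k : String) (x : α) :
    ∀ (ys : List α), ys.Pairwise (fun a b => key a ≤ key b) →
    (PySem.List.insertBy (fun a b => decide (key a < key b)) x ys).filter (fun y => key y == k)
      = ys.filter (fun y => key y == k) ++ (if key x == k then [x] else [])
  | [], _ => by by_cases h : key x = k <;> simp [PySem.List.insertBy, h]
  | y :: ys, hp => by
    rw [PySem.List.insertBy.eq_def]
    rcases List.pairwise_cons.mp hp with ⟨hy, hys⟩
    by_cases hlt : key x < key y
    · simp only [decide_eq_true_eq, if_pos hlt]
      by_cases hxk : key x = k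
      · have hnil : (y :: ys).filter (fun y => key y == k) = [] := by
          apply List.filter_eq_nil_iff.mpr
          intro z hz
          have : key x < key z := by
            rcases List.mem_cons.mp hz with h | h
            · exact h ▸ hlt
            · exact lt_of_lt_of_le hlt (hy z h)
          simp [hxk ▸ this.ne']
        simp [hxk, hnil]
      · have : (key x == k) = false := by simpa using hxk
        simp [List.filter_cons, this]
    · simp only [decide_eq_true_eq, if_neg hlt]
      rw [List.filter_cons, List.filter_cons, pv_filter_insertBy key k x ys hys]
      by_cases hyk : (key y == k)
      · simp [hyk]
      · simp [hyk]

-- hence sorting by key leaves the sublist of rows with any fixed key unchanged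
lemma pv_filter_sorted_aux {α : Type} (key : α → String) (k : String) :
    ∀ (xs acc : List α), acc.Pairwise (fun a b => key a ≤ key b) →
    (xs.foldl (fun acc x => PySem.List.insertBy (fun a b => decide (key a < key b)) x acc) acc).filter
        (fun y => key y == k)
      = acc.filter (fun y => key y == k) ++ xs.filter (fun y => key y == k)
  | [], acc, _ => by simp
  | x :: xs, acc, hp => by
    rw [List.foldl_cons,
      pv_filter_sorted_aux key k xs _ (PySem.List.insertBy_pairwise_le key x acc hp),
      pv_filter_insertBy key k x acc hp, List.filter_cons, List.append_assoc]
    by_cases hxk : (key x == k)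
    · simp [hxk]
    · simp [hxk]

lemma pv_filter_sorted {α : Type} (key : α → String) (k : String) (xs : List α) :
    (PySem.List.sorted xs key false).filter (fun y => key y == k)
      = xs.filter (fun y => key y == k) := by
  rw [show PySem.List.sorted xs key false = PySem.List.sorted xs key from rfl,
    PySem.List.sorted_eq_foldl_insertBy]
  simpa using pv_filter_sorted_aux key k xs [] (by simp)

-- set(first occurrences) of a list whose head's run fills l₁ and never reappears in l₂
lemma pv_ofList_run (a : String) (l₁ l₂ : List String)
    (h1 : ∀ x ∈ l₁, x = a) (h2 : a ∉ l₂) :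
    PySem.Set.ofList (a :: (l₁ ++ l₂)) = a :: PySem.Set.ofList l₂ := by
  have hstep : ∀ (m : List String), (∀ x ∈ m, x = a) → m.foldl PySem.Set.add [a] = [a] := by
    intro m hm
    induction m with
    | nil => rfl
    | cons b m ih =>
        rw [List.foldl_cons, show PySem.Set.add [a] b = [a] from by
          rw [hm b List.mem_cons_self]; exact PySem.Set.add_of_mem (by simp)]
        exact ih (fun x hx => hm x (List.mem_cons_of_mem _ hx))
  rw [PySem.Set.ofList_eq_foldl, List.foldl_cons, List.foldl_append]
  have ha : PySem.Set.add [] a = [a] := by simp [PySem.Set.add, PySem.Set.contains]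
  rw [ha, hstep l₁ h1, ← PySem.Set.update_eq_foldl, PySem.Set.update_eq_append_filter]
  have : List.filter (fun y => !PySem.Set.contains [a] y) (PySem.Set.ofList l₂) = PySem.Set.ofList l₂ := by
    apply List.filter_eq_self.mpr
    intro y hy
    have : y ≠ a := by
      rintro rfl; exact h2 ((PySem.Set.mem_ofList _ _).mp hy)
    simp [PySem.Set.contains, this]
  rw [this]
  rfl

-- first occurrences of a list form a sublist of it
lemma pv_ofList_sublist : ∀ (l : List String), (PySem.Set.ofList l).Sublist l
  | [] => by simp [PySem.Set.ofList_nil]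
  | x :: xs => by
    rw [PySem.Set.ofList_cons]
    exact ((List.filter_sublist).trans (pv_ofList_sublist xs)).cons₂ x

-- B's sweep over a key-ordered row list is the map over its distinct keys of the
-- per-key dict of (year, value) pairs
lemma pv_sweep_eq : ∀ (l : List (String × Int × List Int)),
    l.Pairwise (fun a b => a.1 ≤ b.1) →
    pvSweep l
      = (PySem.Set.ofList (l.map (·.1))).map
          (fun k => [[(k, (PySem.Dict.ofList ((l.filter (fun r => r.1 == k)).map (fun r => (r.2.1, r.2.2)))).items)]])
  | [], _ => by simp [pvSweep, PySem.Set.ofList_nil]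
  | r :: rest, hp => by
    rcases List.pairwise_cons.mp hp with ⟨hr, hrest⟩
    rw [pvSweep]
    set run := rest.takeWhile (fun s => s.1 == r.1) with hrun
    set rest' := rest.dropWhile (fun s => s.1 == r.1) with hrest'
    have hsplit : run ++ rest' = rest := List.takeWhile_append_dropWhile
    have hrunkey : ∀ s ∈ run, s.1 = r.1 := by
      intro s hs
      simpa using List.mem_takeWhile_imp hs
    have hgt : ∀ s ∈ rest', r.1 < s.1 := by
      cases hc : rest' with
      | nil => simp
      | cons h t =>
          have hsub : (h :: t).Sublist rest := hc ▸ hrest' ▸ List.dropWhile_sublist _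
          have hhf : (h.1 == r.1) = false := by
            have := List.head?_dropWhile_not (fun s => s.1 == r.1) rest
            rw [← hrest', hc] at this
            simpa using this
          have hhr : r.1 < h.1 :=
            lt_of_le_of_ne (hr h (hsub.subset List.mem_cons_self)) (Ne.symm (by simpa using hhf))
          intro s hs
          rcases List.mem_cons.mp hs with rfl | hs
          · exact hhr
          · exact lt_of_lt_of_le hhr ((List.pairwise_cons.mp (List.Pairwise.sublist hsub hrest)).1 s hs)
    have hfilter_r : (r :: rest).filter (fun s => s.1 == r.1) = r :: run := by
      rw [List.filter_cons, if_pos (by simp), ← hsplit, List.filter_append]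
      rw [List.filter_eq_self.mpr (fun s hs => by simp [hrunkey s hs]),
        List.filter_eq_nil_iff.mpr (fun s hs => by simp [(hgt s hs).ne']), List.append_nil]
    have hkeys : PySem.Set.ofList ((r :: rest).map (·.1)) = r.1 :: PySem.Set.ofList (rest'.map (·.1)) := by
      rw [show (r :: rest).map (fun r => r.1) = r.1 :: (run.map (·.1) ++ rest'.map (·.1)) by
        rw [List.map_cons, ← List.map_append, hsplit]]
      exact pv_ofList_run r.1 _ _ (by simpa using hrunkey)
        (by simp only [List.mem_map]
            rintro ⟨s, hs, hseq⟩
            exact absurd (hseq ▸ hgt s hs) (lt_irrefl _))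
    have hfilter_k : ∀ k ∈ PySem.Set.ofList (rest'.map (·.1)),
        (r :: rest).filter (fun s => s.1 == k) = rest'.filter (fun s => s.1 == k) := by
      intro k hk
      obtain ⟨s₀, hs₀, rfl⟩ := List.mem_map.mp ((PySem.Set.mem_ofList _ _).mp hk)
      have hrk : r.1 < s₀.1 := hgt s₀ hs₀
      rw [List.filter_cons, if_neg (by simp [hrk.ne]), ← hsplit, List.filter_append,
        List.filter_eq_nil_iff.mpr (fun s hs => by simp [hrunkey s hs, hrk.ne]), List.nil_append]
    rw [hkeys, List.map_cons]
    refine List.cons_eq_cons.mpr ⟨?_, ?_⟩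
    · simp only [hfilter_r]
      simp
    · rw [pv_sweep_eq rest' (List.Pairwise.sublist (hrest' ▸ List.dropWhile_sublist _) hrest)]
      exact List.map_congr_left fun k hk => by rw [hfilter_k k hk]
termination_by l => l.length
decreasing_by simpa using Nat.lt_succ_of_le (List.dropWhile_sublist _).length_le

-- the sorted distinct keys are the distinct keys of the sorted rows
lemma pv_sorted_keys (rows : List (String × Int × List Int)) :
    PySem.List.sorted (PySem.Set.ofList (rows.map (·.1))) (fun k => k) false
      = PySem.Set.ofList ((PySem.List.sorted rows (fun r => r.1) false).map (·.1)) := by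
  apply PySem.List.sorted_eq_of_perm_of_pairwise_lt
  · apply (List.perm_ext_iff_of_nodup (PySem.Set.nodup_ofList _) (PySem.Set.nodup_ofList _)).mpr
    intro a
    simp only [PySem.Set.mem_ofList, List.mem_map]
    constructor
    · rintro ⟨s, hs, rfl⟩
      exact ⟨s, ((PySem.List.sorted_perm rows (fun r => r.1) false).mem_iff).mp hs, rfl⟩
    · rintro ⟨s, hs, rfl⟩
      exact ⟨s, ((PySem.List.sorted_perm rows (fun r => r.1) false).mem_iff).mpr hs, rfl⟩
  · have hle : (PySem.Set.ofList ((PySem.List.sorted rows (fun r => r.1) false).map (·.1))).Pairwise (· ≤ ·) :=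
      List.Pairwise.sublist (pv_ofList_sublist _)
        (by simpa using PySem.List.sorted_map_key_pairwise rows (fun r => r.1))
    have hn := PySem.Set.nodup_ofList ((PySem.List.sorted rows (fun r => r.1) false).map (·.1))
    exact (hn.and hle).imp (fun h => lt_of_le_of_ne h.2 h.1)

-- ===== VERDICT (by name: the statement is the Claim_ definition above) =====
theorem reorder_namedict_spec : Claim_equal_reorder_namedict := by
  intro namedict _
  unfold Spec_reorder_namedict reorder_namedict reorder_namedict_alt
  simp only [pv_flatten]
  set rows := ((PySem.Dict.ofList namedict).items.flatMap
    (fun p => p.2.map (fun t => (pyStrPair t.1 t.2.1, p.1, [t.2.2.1, t.2.2.2])))) with hrows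
  rw [PySem.List.foldl_append_singleton_eq_map, pv_keys, List.nil_append,
    pv_sweep_eq _ (by simpa using PySem.List.sorted_pairwise rows (fun r => r.1)),
    ← pv_sorted_keys]
  refine List.map_congr_left (fun k _ => ?_)
  rw [pv_group, pv_filter_sorted (fun r => r.1) k rows]
  simp only [PySem.Dict.getD_empty]
  rw [show (PySem.Dict.ofList ((rows.filter (fun r => r.1 == k)).map (fun r => (r.2.1, r.2.2))) : PySem.Dict Int (List Int))
      = ((rows.filter (fun r => r.1 == k)).map (fun r => (r.2.1, r.2.2))).foldl (fun d p => d.insert p.1 p.2) PySem.Dict.empty from rfl,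
    List.foldl_map]
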